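-- pv_equiv track=rewrite | github.com/OSU-NLP-Group/Bio-Tokenization | src/data_utils.py | bio_to_tokenized
-- ===== SOURCE A (Python) =====
-- def bio_to_tokenized(word, bio):
--
--     tokenized = []
--
--     curr_token = []
--
--     prev_tag = 'B'
--
--     index = 0
--
--     for letter, tag in zip(word, bio):
--
--         if tag == 'B' and len(curr_token) > 0:
--             if index == 0:
--                 tokenized.append(''.join(curr_token))
--             else:
--                 tokenized.append('##' + ''.join(curr_token))
--
--             curr_token = []
--             index += 1
--
--         curr_token.append(letter)
--         prev_tag = tag
--
--     if index == 0:
--         tokenized.append(''.join(curr_token))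
--     else:
--         tokenized.append('##' + ''.join(curr_token))
--
--     return ' '.join(tokenized)
-- ===== SOURCE B (Python) =====
-- def bio_to_tokenized(word, bio):
--     out = []
--     for i, (letter, tag) in enumerate(zip(word, bio)):
--         if i > 0 and tag == 'B':
--             out.append(' ##')
--         out.append(letter)
--     return ''.join(out)
-- ===== Notes on version B (the rewrite author's own statement) =====
-- stated objective: simpler
-- what changed: Replaced the accumulate-and-flush token buffer (curr_token list, flush-on-B with a first-token index counter, final flush, join of a token list) by direct emission: one pass that writes each letter and inserts ' ##' before every non-initial B-tagged position.
import Mathlib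
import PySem

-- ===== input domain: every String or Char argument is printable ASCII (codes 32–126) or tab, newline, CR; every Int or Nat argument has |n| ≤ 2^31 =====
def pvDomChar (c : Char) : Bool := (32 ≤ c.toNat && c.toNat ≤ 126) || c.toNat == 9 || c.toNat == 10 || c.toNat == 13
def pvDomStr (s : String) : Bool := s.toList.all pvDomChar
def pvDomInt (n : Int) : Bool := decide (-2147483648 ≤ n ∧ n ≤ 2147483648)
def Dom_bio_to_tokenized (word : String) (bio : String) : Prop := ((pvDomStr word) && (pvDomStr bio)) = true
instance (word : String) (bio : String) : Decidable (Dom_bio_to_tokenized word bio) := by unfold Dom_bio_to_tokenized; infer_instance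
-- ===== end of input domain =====

-- B builds the output by direct emission (letter by letter, inserting " ##" before each
-- non-initial B-tagged letter) instead of A's accumulate-and-flush token buffer; objective: simpler.

-- ===== PORT A =====
-- A's loop state: (tokenized, curr_token, index); tokens kept as List Char (''.join(curr_token)).
-- (A's variable prev_tag is written but never read; it is omitted.)
def bioStepA (st : List (List Char) × List Char × Int) (lt : Char × Char) :
    List (List Char) × List Char × Int :=
  let tokenized := st.1
  let curr_token := st.2.1
  let index := st.2.2
  if lt.2 == 'B' && decide (curr_token.length > 0) then
    let tokenized := if index == 0 then tokenized ++ [curr_token]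
                     else tokenized ++ ['#' :: '#' :: curr_token]
    (tokenized, [lt.1], index + 1)
  else
    (tokenized, curr_token ++ [lt.1], index)

-- the code after the loop: the final flush of curr_token, with '##' unless index == 0
def bioFinishA (fin : List (List Char) × List Char × Int) : List (List Char) :=
  if fin.2.2 == 0 then fin.1 ++ [fin.2.1] else fin.1 ++ ['#' :: '#' :: fin.2.1]

def bio_to_tokenized (word : String) (bio : String) : String :=
  let fin := (List.zip word.toList bio.toList).foldl bioStepA ([], [], 0)
  String.mk (PySem.Chars.join [' '] (bioFinishA fin))

-- ===== PORT B =====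
def bioStepB (acc : List Char) (p : Int × Char × Char) : List Char :=
  (if decide (p.1 > 0) && (p.2.2 == 'B') then acc ++ [' ', '#', '#'] else acc) ++ [p.2.1]

def bio_to_tokenized_alt (word : String) (bio : String) : String :=
  String.mk ((PySem.List.enumerate (List.zip word.toList bio.toList) 0).foldl bioStepB [])

-- ===== PRECONDITION & SPEC =====
def Spec_bio_to_tokenized (word : String) (bio : String) (out : String) : Prop := out = bio_to_tokenized_alt word bio
instance (word : String) (bio : String) (out : String) : Decidable (Spec_bio_to_tokenized word bio out) := by unfold Spec_bio_to_tokenized; infer_instance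

-- ===== CLAIM (what is proved, stated in full; the proofs are below) =====
def Claim_equal_bio_to_tokenized : Prop := ∀ (word : String) (bio : String), Dom_bio_to_tokenized word bio → Spec_bio_to_tokenized word bio (bio_to_tokenized word bio)

-- ===== LEMMAS AND PROOFS =====

-- The grouping both programs compute: the running token is extended by each letter,
-- and a 'B' tag at a later position starts a new group.
def goSpec (cur : List Char) : List (Char × Char) → List (List Char)
  | [] => [cur]
  | p :: rest => if p.2 == 'B' then cur :: goSpec [p.1] rest else goSpec (cur ++ [p.1]) rest

def markRest (gs : List (List Char)) : List (List Char) := gs.map (fun g => '#' :: '#' :: g)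

def markAll : List (List Char) → List (List Char)
  | [] => []
  | g :: gs => g :: markRest gs

def emitRest : List (Char × Char) → List Char
  | [] => []
  | p :: rest => (if p.2 == 'B' then [' ', '#', '#'] else []) ++ p.1 :: emitRest rest

theorem intercalate_cons_head (sep : List Char) (c : Char) (g : List Char)
    (gs : List (List Char)) :
    sep.intercalate ((c :: g) :: gs) = c :: sep.intercalate (g :: gs) := by
  cases gs <;> simp [List.intercalate, List.intersperse]

theorem goSpec_ne_nil (zs : List (Char × Char)) (cur : List Char) : goSpec cur zs ≠ [] := by
  induction zs generalizing cur with
  | nil => simp [goSpec]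
  | cons p rest ih =>
    simp only [goSpec]
    split <;> simp [ih]

-- joining the marked groups with ' ' flattens to the emission form
theorem join_markAll (zs : List (Char × Char)) (cur : List Char) :
    PySem.Chars.join [' '] (markAll (goSpec cur zs)) = cur ++ emitRest zs := by
  induction zs generalizing cur with
  | nil => simp [goSpec, markAll, markRest, emitRest, PySem.Chars.join_singleton]
  | cons p rest ih =>
    by_cases hB : p.2 = 'B'
    · have hne := goSpec_ne_nil rest [p.1]
      obtain ⟨g, gs, hg⟩ : ∃ g gs, goSpec [p.1] rest = g :: gs := by
        cases h : goSpec [p.1] rest with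
        | nil => exact absurd h hne
        | cons a b => exact ⟨a, b, rfl⟩
      have ihg := ih [p.1]
      rw [hg] at ihg
      simp only [goSpec, hB, beq_self_eq_true, if_true, markAll, hg,
        markRest, List.map_cons, PySem.Chars.join_cons_cons, emitRest]
      simp only [markAll, markRest, PySem.Chars.join] at ihg ⊢
      rw [intercalate_cons_head, intercalate_cons_head, ihg]
      simp
    · simp only [goSpec, beq_iff_eq, if_neg hB, emitRest]
      rw [ih (cur ++ [p.1])]
      simp [hB]

-- A's fold from any reachable state (index = number of tokens flushed so far, running
-- token nonempty) finishes with the marked groups of goSpec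
theorem A_fold (zs : List (Char × Char)) :
    ∀ (tok : List (List Char)) (cur : List Char), cur ≠ [] →
    bioFinishA (zs.foldl bioStepA (tok, cur, (tok.length : Int)))
      = tok ++ (if tok.isEmpty then markAll (goSpec cur zs) else markRest (goSpec cur zs)) := by
  induction zs with
  | nil =>
    intro tok cur hcur
    cases tok with
    | nil => simp [bioFinishA, goSpec, markAll, markRest]
    | cons t ts =>
      have h0b : ((((t :: ts : List (List Char)).length : Int)) == 0) = false := by
        simp only [beq_eq_false_iff_ne, ne_eq, List.length_cons]
        push_cast
        omega
      simp only [List.foldl_nil, bioFinishA]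
      rw [h0b]
      simp [goSpec, markRest]
  | cons p rest ih =>
    intro tok cur hcur
    have hlen : (decide (cur.length > 0)) = true := by
      simp [List.length_pos_iff, hcur]
    rw [List.foldl_cons]
    by_cases hB : p.2 = 'B'
    · cases tok with
      | nil =>
        have e : bioStepA ([], cur, ((List.length ([] : List (List Char)) : Int)))  p
            = ([cur], [p.1], ((List.length ([cur] : List (List Char)) : Int))) := by
          simp [bioStepA, hB, hlen]
        rw [e, ih [cur] [p.1] (by simp)]
        simp [goSpec, hB, markAll]
      | cons t ts =>
        have h0b : ((((t :: ts : List (List Char)).length : Int)) == 0) = false := by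
          simp only [beq_eq_false_iff_ne, ne_eq, List.length_cons]
          push_cast
          omega
        have hBb : (p.2 == 'B') = true := by simp [hB]
        have e : bioStepA (t :: ts, cur, (((t :: ts : List (List Char)).length : Int))) p
            = (t :: ts ++ ['#' :: '#' :: cur], [p.1],
               (((t :: ts ++ ['#' :: '#' :: cur] : List (List Char)).length : Int))) := by
          simp only [bioStepA, hBb, hlen, Bool.and_self, if_true]
          rw [h0b]
          simp only [Bool.false_eq_true, if_false, Prod.mk.injEq, List.cons_append,
            List.length_cons, List.length_append, List.length_singleton]
          refine ⟨trivial, trivial, ?_⟩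
          simp
        rw [e, ih (t :: ts ++ ['#' :: '#' :: cur]) [p.1] (by simp)]
        have hg := goSpec_ne_nil rest [p.1]
        cases hg2 : goSpec [p.1] rest with
        | nil => exact absurd hg2 hg
        | cons g gs => simp [goSpec, hB, hg2, markRest]
    · have e : bioStepA (tok, cur, ((tok.length : Int))) p
          = (tok, cur ++ [p.1], ((tok.length : Int))) := by
        simp [bioStepA, hB]
      rw [e, ih tok (cur ++ [p.1]) (by simp)]
      simp [goSpec, hB]

-- B's fold over the positions of index ≥ 1 emits emitRest
theorem B_fold (zs : List (Char × Char)) :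
    ∀ (acc : List Char) (n : Int), 0 < n →
    (PySem.List.enumerate zs n).foldl bioStepB acc = acc ++ emitRest zs := by
  induction zs with
  | nil => intro acc n _; simp [PySem.List.enumerate_nil, emitRest]
  | cons p rest ih =>
    intro acc n hn
    rw [PySem.List.enumerate_cons, List.foldl_cons]
    have hpos : decide (((n, p) : Int × Char × Char).1 > 0) = true := by
      simp only [decide_eq_true_eq]
      omega
    rw [ih _ (n + 1) (by omega)]
    by_cases hB : p.2 = 'B' <;> simp [bioStepB, hpos, hB, emitRest, List.append_assoc]

-- ===== VERDICT (by name: the statement is the Claim_ definition above) =====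
theorem bio_to_tokenized_spec : Claim_equal_bio_to_tokenized := by
  unfold Claim_equal_bio_to_tokenized
  intro word bio _
  unfold Spec_bio_to_tokenized bio_to_tokenized bio_to_tokenized_alt
  cases hz : List.zip word.toList bio.toList with
  | nil => simp [PySem.List.enumerate_nil, bioFinishA, PySem.Chars.join_singleton]
  | cons p rest =>
    rw [PySem.List.enumerate_cons, List.foldl_cons, List.foldl_cons]
    have e1 : bioStepA ([], [], 0) p = ([], [p.1], 0) := by
      simp [bioStepA]
    have e2 : bioStepB [] ((0 : Int), p) = [p.1] := by
      simp [bioStepB]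
    rw [e1, e2, zero_add]
    have hA := A_fold rest [] [p.1] (by simp)
    simp only [List.length_nil, Nat.cast_zero, List.isEmpty_nil, if_true,
      List.nil_append] at hA
    show String.mk (PySem.Chars.join [' ']
        (bioFinishA ((List.foldl bioStepA ([], [p.1], 0) rest))))
      = String.mk (List.foldl bioStepB [p.1] (PySem.List.enumerate rest 1))
    rw [hA, B_fold rest [p.1] 1 (by norm_num), join_markAll]
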